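-- pv_equiv track=rewrite | github.com/rzharzhavsky/Bluff-RAG | metrics_bluff_rag.py | _can_claim_be_attributed
-- ===== SOURCE A (Python) =====
-- from typing import List, Tuple, Dict, Any, Union, Optional
-- import string
--
-- def normalize_text(text: str) -> str:
--     """Normalize text for comparison by converting to lowercase and removing punctuation."""
--     if not text:
--         return ""
--     # Convert to lowercase and remove punctuation
--     text = text.lower().translate(str.maketrans('', '', string.punctuation))
--     # Remove extra whitespace
--     return ' '.join(text.split())
--
-- def _can_claim_be_attributed(claim: str, source_texts: List[str]) -> bool:
--     """Check if a claim can be attributed to any source text."""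
--     if not claim or not source_texts:
--         return False
--
--     claim_tokens = set(normalize_text(claim).split())
--
--     # Remove stop words for better matching
--     stop_words = {'the', 'a', 'an', 'and', 'or', 'but', 'in', 'on', 'at', 'to', 'for', 'of', 'with', 'by', 'is', 'are', 'was', 'were', 'be', 'been', 'have', 'has', 'had', 'do', 'does', 'did', 'will', 'would', 'could', 'should', 'may', 'might', 'can', 'this', 'that', 'these', 'those'}
--     claim_tokens = claim_tokens - stop_words
--
--     if not claim_tokens:
--         return False
--
--     best_overlap_ratio = 0.0
--
--     for source_text in source_texts:
--         source_tokens = set(normalize_text(source_text).split())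
--         source_tokens = source_tokens - stop_words
--
--         if not source_tokens:
--             continue
--
--         # Check if significant portion of claim tokens appear in source
--         overlap = len(claim_tokens.intersection(source_tokens))
--         overlap_ratio = overlap / len(claim_tokens)
--
--         best_overlap_ratio = max(best_overlap_ratio, overlap_ratio)
--
--     # Require at least 25% overlap for attribution
--     return best_overlap_ratio >= 0.25
-- ===== SOURCE B (Python) =====
-- from typing import List
-- import string
--
-- def normalize_text(text: str) -> str:
--     """Normalize text for comparison by converting to lowercase and removing punctuation."""
--     if not text:
--         return ""
--     text = text.lower().translate(str.maketrans('', '', string.punctuation))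
--     return ' '.join(text.split())
--
-- _STOP_WORDS = {'the', 'a', 'an', 'and', 'or', 'but', 'in', 'on', 'at', 'to', 'for', 'of', 'with', 'by', 'is', 'are', 'was', 'were', 'be', 'been', 'have', 'has', 'had', 'do', 'does', 'did', 'will', 'would', 'could', 'should', 'may', 'might', 'can', 'this', 'that', 'these', 'those'}
--
-- def _can_claim_be_attributed(claim: str, source_texts: List[str]) -> bool:
--     """Check if a claim can be attributed to any source text (>= 25% token overlap).
--
--     Token-major pass: instead of intersecting the claim set with each source set
--     and tracking the best ratio, walk the claim tokens once and maintain one hit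
--     counter per source; a claim is attributable iff some counter reaches a
--     quarter of the claim's token count (4*hits >= len exactly matches the float
--     test hits/len >= 0.25, since 0.25 is exactly representable)."""
--     if not claim or not source_texts:
--         return False
--     claim_tokens = set(normalize_text(claim).split()) - _STOP_WORDS
--     if not claim_tokens:
--         return False
--     source_sets = [set(normalize_text(s).split()) - _STOP_WORDS for s in source_texts]
--     counts = [0] * len(source_sets)
--     for tok in claim_tokens:
--         counts = [c + (tok in ss) for c, ss in zip(counts, source_sets)]
--     return any(4 * c >= len(claim_tokens) for c in counts)
-- ===== Notes on version B (the rewrite author's own statement) =====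
-- stated objective: alternative
-- what changed: Inverts the loop nesting: instead of intersecting the claim token set with each source set and maxing a per-source overlap ratio, B walks the claim tokens once, maintaining one hit counter per source, and tests at the end whether any counter reaches a quarter of the claim token count (integer test 4*c >= len, exactly equivalent to the float ratio >= 0.25); empty sources need no skip since a zero counter never reaches the threshold.
import Mathlib
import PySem

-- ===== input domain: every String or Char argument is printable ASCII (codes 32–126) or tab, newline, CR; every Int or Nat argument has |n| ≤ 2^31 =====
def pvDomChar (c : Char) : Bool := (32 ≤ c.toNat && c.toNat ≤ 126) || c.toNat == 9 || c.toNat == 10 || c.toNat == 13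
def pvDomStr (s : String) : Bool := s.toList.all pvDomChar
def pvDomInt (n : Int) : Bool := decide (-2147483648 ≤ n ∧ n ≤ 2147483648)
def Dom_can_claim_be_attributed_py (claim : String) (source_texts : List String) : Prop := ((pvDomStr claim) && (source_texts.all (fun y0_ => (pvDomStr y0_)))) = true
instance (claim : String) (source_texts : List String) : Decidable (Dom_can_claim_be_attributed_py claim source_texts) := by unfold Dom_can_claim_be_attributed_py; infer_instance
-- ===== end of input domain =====

-- B inverts the loop nesting: a single pass over the claim tokens maintains one hit counter
-- per source (integer threshold 4*c >= len, exactly the float ratio >= 0.25); objective: alternative.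


-- ===== PORT A =====
-- string.punctuation
def pyPunctuation : List Char := "!\"#$%&'()*+,-./:;<=>?@[\\]^_`{|}~".toList

-- normalize_text: lowercase, drop punctuation (str.translate deleting string.punctuation
-- is, character for character, a filter), then ' '.join(text.split()).
def normalize_text (text : String) : String :=
  if text = "" then ""
  else
    String.ofList (PySem.Chars.join [' ']
      (PySem.Chars.split₀ ((PySem.Chars.lower text.toList).filter
        (fun c => !(pyPunctuation.contains c)))))

-- the stop_words set literal (a Python set of distinct string literals)
def stopWords : PySem.Set String :=
  PySem.Set.ofList ["the", "a", "an", "and", "or", "but", "in", "on", "at", "to", "for", "of",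
    "with", "by", "is", "are", "was", "were", "be", "been", "have", "has", "had", "do", "does",
    "did", "will", "would", "could", "should", "may", "might", "can", "this", "that", "these",
    "those"]

-- set(normalize_text(t).split()) - stop_words
def tokenSet (t : String) : PySem.Set String :=
  PySem.Set.diff (PySem.Set.ofList (PySem.Str.split₀ (normalize_text t))) stopWords

-- Port of A. best_overlap_ratio is the float max of overlap/len(claim_tokens) over the
-- non-skipped sources; all ratios share the fixed denominator L = len(claim_tokens) ≥ 1, so
-- the float max is max of numerators, and the final float comparison best/L >= 0.25 (0.25 is
-- exactly representable, L ≤ 2^31, so rounding of the quotient never crosses 0.25) holds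
-- exactly when 4*best ≥ L: the port carries the numerator 'best : Nat' — this represents the
-- float state exactly, it does not change the algorithm.
def can_claim_be_attributed_py (claim : String) (source_texts : List String) : Bool :=
  if claim = "" || source_texts = [] then false
  else
    let claim_tokens := tokenSet claim
    if claim_tokens = [] then false
    else
      let best : Nat := source_texts.foldl (fun best source_text =>
        let source_tokens := tokenSet source_text
        if source_tokens = [] then best
        else max best (PySem.Set.inter claim_tokens source_tokens).length) 0
      decide (claim_tokens.length ≤ 4 * best)

-- ===== PORT B =====
-- Port of B: same guards, then a token-major pass — one hit counter per source, bumped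
-- while walking the claim tokens ('c + (tok in ss)' adds the bool as 0/1; the zip
-- comprehension is List.zipWith) — and the integer threshold L ≤ 4*c at the end
-- (exactly Source B's '4 * c >= len(claim_tokens)').
def can_claim_be_attributed_py_alt (claim : String) (source_texts : List String) : Bool :=
  if claim = "" || source_texts = [] then false
  else
    let claim_tokens := tokenSet claim
    if claim_tokens = [] then false
    else
      let source_sets := source_texts.map tokenSet
      let counts := claim_tokens.foldl
        (fun counts tok =>
          List.zipWith (fun c ss => c + (if PySem.Set.contains ss tok then 1 else 0))
            counts source_sets)
        (List.replicate source_sets.length 0)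
      counts.any (fun c => decide (claim_tokens.length ≤ 4 * c))

-- ===== PRECONDITION & SPEC =====
def Spec_can_claim_be_attributed_py (claim : String) (source_texts : List String) (out : Bool) : Prop := out = can_claim_be_attributed_py_alt claim source_texts
instance (claim : String) (source_texts : List String) (out : Bool) : Decidable (Spec_can_claim_be_attributed_py claim source_texts out) := by unfold Spec_can_claim_be_attributed_py; infer_instance

-- ===== CLAIM =====
def Claim_equal_can_claim_be_attributed_py : Prop := ∀ (claim : String) (source_texts : List String), Dom_can_claim_be_attributed_py claim source_texts → Spec_can_claim_be_attributed_py claim source_texts (can_claim_be_attributed_py claim source_texts)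

-- ===== LEMMAS AND PROOFS =====

-- A's max-accumulator, thresholded at the end, equals 'some source meets the threshold':
-- induction over the sources, generalizing the accumulator.
theorem foldl_max_threshold (L : Nat) (f : String → List String) (n : String → Nat)
    (srcs : List String) : ∀ b : Nat,
    decide (L ≤ 4 * srcs.foldl (fun best s => if f s = [] then best else max best (n s)) b)
      = (decide (L ≤ 4 * b) ||
         srcs.any (fun s => f s ≠ [] && decide (L ≤ 4 * n s))) := by
  induction srcs with
  | nil => intro b; simp
  | cons s t ih =>
      intro b
      simp only [List.foldl_cons, List.any_cons]
      by_cases h : f s = []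
      · simp [h, ih]
      · simp only [h, if_false, ih, ne_eq, not_false_eq_true, decide_true, Bool.true_and]
        have hiff : (L ≤ 4 * max b (n s)) ↔ (L ≤ 4 * b ∨ L ≤ 4 * n s) := by omega
        rw [decide_eq_decide.mpr hiff, Bool.decide_or, Bool.or_assoc]

-- zipWith with the same right list composes pointwise
theorem zipWith_zipWith_same {α β γ δ : Type} (f : α → β → γ) (g : γ → β → δ)
    (a : List α) : ∀ b : List β,
    List.zipWith g (List.zipWith f a b) b = List.zipWith (fun x y => g (f x y) y) a b := by
  induction a with
  | nil => intro b; simp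
  | cons x xs ih => intro b; cases b with
    | nil => simp
    | cons y ys => simp [ih]

-- zipWith projecting the left list is the identity when the left list is no longer
theorem zipWith_fst {α β : Type} (a : List α) : ∀ b : List β, a.length ≤ b.length →
    List.zipWith (fun x (_ : β) => x) a b = a := by
  induction a with
  | nil => intro b _; simp
  | cons x xs ih => intro b hb; cases b with
    | nil => simp at hb
    | cons y ys => simpa using ih ys (by simpa using hb)

-- the counter pass: after folding over toks, counter i has gained the number of toks its set contains
theorem fold_counts (toks : List String) : ∀ (counts : List Nat) (sets : List (PySem.Set String)),
    counts.length = sets.length →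
    toks.foldl (fun cs tok =>
        List.zipWith (fun c ss => c + (if PySem.Set.contains ss tok then 1 else 0)) cs sets) counts
      = List.zipWith (fun c ss =>
          c + (toks.filter (fun t => PySem.Set.contains ss t)).length) counts sets := by
  induction toks with
  | nil =>
      intro counts sets h
      simp only [List.foldl_nil, List.filter_nil, List.length_nil, Nat.add_zero]
      exact (zipWith_fst counts sets (le_of_eq h)).symm
  | cons t ts ih =>
      intro counts sets h
      simp only [List.foldl_cons]
      rw [ih _ sets (by simp [h]), zipWith_zipWith_same]
      have hfun : (fun (x : Nat) (y : PySem.Set String) =>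
          (x + if PySem.Set.contains y t then 1 else 0)
            + (ts.filter (fun t => PySem.Set.contains y t)).length)
          = (fun (x : Nat) (y : PySem.Set String) =>
              x + ((t :: ts).filter (fun t => PySem.Set.contains y t)).length) := by
        funext x y
        rw [List.filter_cons]
        by_cases hb : t ∈ y <;> simp [hb] <;> try omega
      rw [hfun]

-- zipWith starting from replicated zeros is a map
theorem zipWith_replicate_zero {β γ : Type} (g : Nat → β → γ) (b : List β) :
    List.zipWith g (List.replicate b.length 0) b = b.map (g 0) := by
  induction b with
  | nil => rfl
  | cons y ys ih => simpa [List.replicate_succ] using ih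

-- ===== VERDICT =====
theorem can_claim_be_attributed_py_spec : Claim_equal_can_claim_be_attributed_py := by
  intro claim source_texts _
  unfold Spec_can_claim_be_attributed_py can_claim_be_attributed_py can_claim_be_attributed_py_alt
  by_cases h0 : claim = "" || source_texts = []
  · simp [h0]
  · simp only [h0]
    by_cases h1 : tokenSet claim = []
    · simp [h1]
    · simp only [h1, if_false, Bool.false_eq_true]
      have hL : 0 < (tokenSet claim).length := List.length_pos_iff.mpr h1
      -- A's side: fold-max + final threshold = any source meets the threshold
      have hA := foldl_max_threshold (tokenSet claim).length tokenSet
        (fun s => (PySem.Set.inter (tokenSet claim) (tokenSet s)).length) source_texts 0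
      have hz : decide ((tokenSet claim).length ≤ 4 * 0) = false := by
        simp only [decide_eq_false_iff_not]; omega
      rw [hA, hz, Bool.false_or]
      -- B's side: evaluate the counter fold
      rw [fold_counts _ _ _ (by simp), zipWith_replicate_zero, List.any_map, List.any_map]
      -- pointwise equality of the two per-source predicates
      apply List.any_congr rfl
      intro s
      simp only [Function.comp]
      by_cases he : tokenSet s = []
      · simp [he]
        omega
      · have hi : PySem.Set.inter (tokenSet claim) (tokenSet s)
            = (tokenSet claim).filter (fun t => PySem.Set.contains (tokenSet s) t) := rfl
        simp [he, hi]
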